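-- pv_equiv track=rewrite | github.com/DaddyElonMusk69/agentic_terminal | backend/src/app/application/monitored_assets/service.py | _merge_assets
-- ===== SOURCE A (Python) =====
-- from typing import Iterable, List, Sequence
--
-- def _merge_assets(base_assets: Iterable[str], extras: Iterable[str]) -> List[str]:
--     seen = set()
--     merged: List[str] = []
--
--     for asset in base_assets:
--         normalized = _normalize_asset(asset)
--         if not normalized or normalized in seen:
--             continue
--         seen.add(normalized)
--         merged.append(normalized)
--
--     extra_list = sorted({_normalize_asset(asset) for asset in extras if _normalize_asset(asset)})
--     for asset in extra_list:
--         if asset in seen: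
--             continue
--         seen.add(asset)
--         merged.append(asset)
--
--     return merged
--
-- def _normalize_asset(symbol: str) -> str:
--     value = symbol.strip().upper()
--     if not value:
--         return ""
--     if "/" in value or ":" in value:
--         value = value.replace(":", "/")
--         value = value.split("/")[0]
--     for suffix in ("-PERP", "PERP", "USDT", "-USD", "USD", "-USDC", "USDC"):
--         if value.endswith(suffix):
--             value = value[: -len(suffix)]
--             break
--     return value
-- ===== SOURCE B (Python) =====
-- def _normalize_asset(symbol: str) -> str:
--     value = symbol.strip().upper()
--     if not value:
--         return ""
--     if "/" in value or ":" in value: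
--         value = value.replace(":", "/")
--         value = value.split("/")[0]
--     for suffix in ("-PERP", "PERP", "USDT", "-USD", "USD", "-USDC", "USDC"):
--         if value.endswith(suffix):
--             value = value[: -len(suffix)]
--             break
--     return value
--
--
-- def _first_occurrences(items):
--     # dedup by repeated filtering: take the head, delete every later copy of it
--     out = []
--     rest = list(items)
--     while rest:
--         head = rest[0]
--         out.append(head)
--         rest = [x for x in rest[1:] if x != head]
--     return out
--
--
-- def _merge_assets(base_assets, extras):
--     combined = [n for a in base_assets if (n := _normalize_asset(a))] + \
--                sorted({n for a in extras if (n := _normalize_asset(a))})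
--     return _first_occurrences(combined)
-- ===== Notes on version B (the rewrite author's own statement) =====
-- stated objective: alternative
-- what changed: A's two interleaved seen-set streaming dedup loops are replaced by concatenating the normalized base list with the sorted unique extras and deduplicating by structural recursion that keeps each head and filters all its later copies out of the tail (no seen set, no dict).
import Mathlib
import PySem

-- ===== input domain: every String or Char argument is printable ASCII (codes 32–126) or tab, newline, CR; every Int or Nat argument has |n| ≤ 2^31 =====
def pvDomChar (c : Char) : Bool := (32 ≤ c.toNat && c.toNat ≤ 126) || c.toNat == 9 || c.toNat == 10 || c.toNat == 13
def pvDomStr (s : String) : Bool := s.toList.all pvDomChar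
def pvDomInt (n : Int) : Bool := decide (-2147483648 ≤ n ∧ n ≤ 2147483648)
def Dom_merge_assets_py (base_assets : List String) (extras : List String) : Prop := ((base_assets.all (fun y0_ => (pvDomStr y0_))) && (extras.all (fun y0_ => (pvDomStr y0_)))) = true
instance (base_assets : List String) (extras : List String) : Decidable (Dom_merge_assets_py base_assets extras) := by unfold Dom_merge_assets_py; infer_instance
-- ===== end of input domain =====

-- B replaces A's two interleaved seen-set dedup loops by a filter-out-later-copies dedup loop
-- (no seen set) over the concatenated lists (alternative decomposition; same result, no seen set).

-- shared helper: port of _normalize_asset (used verbatim by both Pythons)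
-- suffix-stripping for-loop with break: first matching suffix is cut, rest skipped
def pvStripSuffix (value : String) : List String → String
  | [] => value
  | s :: rest =>
      if PySem.Str.endswith value s then
        PySem.Str.slice value none (some (-(PySem.Str.len s : Int)))
      else pvStripSuffix value rest

def normalize_asset_py (symbol : String) : String :=
  let value := PySem.Str.upper (PySem.Str.strip symbol)
  if value == "" then ""
  else
    let value :=
      if PySem.Str.isIn "/" value || PySem.Str.isIn ":" value then
        let v := PySem.Str.replace value ":" "/"
        PySem.List.pyGetD ((PySem.Str.split? v "/").getD []) 0 ""
      else value
    pvStripSuffix value ["-PERP", "PERP", "USDT", "-USD", "USD", "-USDC", "USDC"]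

-- ===== PORT A =====
-- the body of A's first loop (seen, merged are the two state components)
def pvStepBase (p : PySem.Set String × List String) (asset : String) : PySem.Set String × List String :=
  let normalized := normalize_asset_py asset
  if normalized == "" || PySem.Set.contains p.1 normalized then p
  else (PySem.Set.add p.1 normalized, p.2 ++ [normalized])

-- the body of A's second loop
def pvStepExtra (p : PySem.Set String × List String) (asset : String) : PySem.Set String × List String :=
  if PySem.Set.contains p.1 asset then p
  else (PySem.Set.add p.1 asset, p.2 ++ [asset])

def merge_assets_py (base_assets : List String) (extras : List String) : List String :=
  let st := base_assets.foldl pvStepBase (PySem.Set.empty, [])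
  -- extra_list = sorted({_normalize_asset(a) for a in extras if _normalize_asset(a)})
  let extra_list := PySem.List.sorted
    (PySem.Set.ofList ((extras.map normalize_asset_py).filter (fun n => !(n == ""))))
    (fun x => x) false
  let st := extra_list.foldl pvStepExtra st
  st.2

-- ===== PORT B =====
-- port of _first_occurrences' while loop: state (out, rest); take the head, filter its copies out
def pvFirstOccLoop (out : List String) : List String → List String
  | [] => out
  | h :: t => pvFirstOccLoop (out ++ [h]) (t.filter (fun x => !(x == h)))
termination_by l => l.length
decreasing_by simpa using Nat.lt_succ_of_le (le_trans (List.length_filter_le _ t.attach) (by simp))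

def merge_assets_py_alt (base_assets : List String) (extras : List String) : List String :=
  let combined :=
    (base_assets.map normalize_asset_py).filter (fun n => !(n == "")) ++
    PySem.List.sorted
      (PySem.Set.ofList ((extras.map normalize_asset_py).filter (fun n => !(n == ""))))
      (fun x => x) false
  pvFirstOccLoop [] combined

-- ===== PRECONDITION & SPEC =====
def Spec_merge_assets_py (base_assets : List String) (extras : List String) (out : List String) : Prop := out = merge_assets_py_alt base_assets extras
instance (base_assets : List String) (extras : List String) (out : List String) : Decidable (Spec_merge_assets_py base_assets extras out) := by unfold Spec_merge_assets_py; infer_instance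

-- ===== CLAIM (what is proved, stated in full; the proofs are below) =====
def Claim_equal_merge_assets_py : Prop := ∀ (base_assets : List String) (extras : List String), Dom_merge_assets_py base_assets extras → Spec_merge_assets_py base_assets extras (merge_assets_py base_assets extras)

-- ===== LEMMAS AND PROOFS =====

-- A's first loop, started on a duplicated state (s, s), keeps seen = merged and is
-- the Set.add fold over the normalized-and-filtered list.
theorem pv_foldBase (l : List String) (s : List String) :
    l.foldl pvStepBase (s, s)
    = (((l.map normalize_asset_py).filter (fun n => !(n == ""))).foldl PySem.Set.add s,
       ((l.map normalize_asset_py).filter (fun n => !(n == ""))).foldl PySem.Set.add s) := by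
  induction l generalizing s with
  | nil => rfl
  | cons a t ih =>
      rw [List.foldl_cons]
      by_cases h0 : normalize_asset_py a = ""
      · have hstep : pvStepBase (s, s) a = (s, s) := by simp [pvStepBase, h0]
        rw [hstep, ih]
        simp [h0]
      · have hstep : pvStepBase (s, s) a
            = (PySem.Set.add s (normalize_asset_py a), PySem.Set.add s (normalize_asset_py a)) := by
          simp only [pvStepBase, PySem.Set.add, PySem.Set.contains]
          split_ifs <;> simp_all
        rw [hstep, ih]
        simp [h0]

-- A's second loop on a duplicated state is the Set.add fold.
theorem pv_foldExtra (l : List String) (s : List String) :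
    l.foldl pvStepExtra (s, s) = (l.foldl PySem.Set.add s, l.foldl PySem.Set.add s) := by
  induction l generalizing s with
  | nil => rfl
  | cons a t ih =>
      rw [List.foldl_cons]
      have hstep : pvStepExtra (s, s) a = (PySem.Set.add s a, PySem.Set.add s a) := by
        simp only [pvStepExtra, PySem.Set.add, PySem.Set.contains]
        split_ifs <;> simp_all
      rw [hstep, ih, List.foldl_cons]

-- copies of an element already in the accumulator are ignored by the Set.add fold
theorem pv_fold_filter (l : List String) (s : List String) (a : String) (ha : a ∈ s) :
    l.foldl PySem.Set.add s = (l.filter (fun x => !(x == a))).foldl PySem.Set.add s := by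
  induction l generalizing s with
  | nil => rfl
  | cons b t ih =>
      by_cases hb : b = a
      · subst hb
        have : PySem.Set.add s b = s := by
          simp [PySem.Set.add, PySem.Set.contains, ha]
        simp [this, ih s ha]
      · have ha' : a ∈ PySem.Set.add s b := by
          simp [PySem.Set.add]; split_ifs <;> simp [ha]
        simp [hb, ih _ ha']

-- a fresh head stays in front of the Set.add fold
theorem pv_fold_cons (l : List String) (s : List String) (h : String) (hl : h ∉ l) :
    l.foldl PySem.Set.add (h :: s) = h :: l.foldl PySem.Set.add s := by
  induction l generalizing s with
  | nil => rfl
  | cons b t ih =>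
      have hbh : b ≠ h := fun e => hl (e ▸ List.mem_cons_self)
      have hstep : PySem.Set.add (h :: s) b = h :: PySem.Set.add s b := by
        simp [PySem.Set.add, PySem.Set.contains, hbh]
        split_ifs <;> simp_all
      rw [List.foldl_cons, hstep, ih _ (fun m => hl (List.mem_cons_of_mem _ m)), List.foldl_cons]

-- first occurrences satisfy the head-and-filter recurrence
theorem pv_ofList_cons (h : String) (t : List String) :
    PySem.Set.ofList (h :: t) = h :: PySem.Set.ofList (t.filter (fun x => !(x == h))) := by
  have hne : h ∉ t.filter (fun x => !(x == h)) := by simp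
  rw [PySem.Set.ofList_eq_foldl, PySem.Set.ofList_eq_foldl, List.foldl_cons]
  have h1 : PySem.Set.add [] h = [h] := rfl
  have h2 : ([h] : List String) = h :: [] := rfl
  rw [h1, pv_fold_filter t [h] h List.mem_cons_self, h2, pv_fold_cons _ _ _ hne]

-- B's filter-dedup loop computes out ++ first occurrences, i.e. out ++ PySem.Set.ofList rest
theorem pvFirstOccLoop_eq_ofList : ∀ (out : List String) (l : List String),
    pvFirstOccLoop out l = out ++ PySem.Set.ofList l
  | out, [] => by simp [pvFirstOccLoop]
  | out, h :: t => by
      rw [pvFirstOccLoop, pvFirstOccLoop_eq_ofList (out ++ [h]) (t.filter (fun x => !(x == h))),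
        pv_ofList_cons]
      simp
termination_by _ l => l.length
decreasing_by exact Nat.lt_succ_of_le (List.length_filter_le _ _)

-- ===== VERDICT (by name: the statement is the Claim_ definition above) =====
theorem merge_assets_py_spec : Claim_equal_merge_assets_py := by
  intro base_assets extras _
  show merge_assets_py base_assets extras = merge_assets_py_alt base_assets extras
  simp only [merge_assets_py, merge_assets_py_alt, PySem.Set.empty, pv_foldBase, pv_foldExtra,
    pvFirstOccLoop_eq_ofList]
  simp only [List.nil_append]
  simp only [PySem.Set.ofList_eq_foldl, List.foldl_append]
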